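-- pv_equiv track=rewrite | github.com/SLEEPYBQ/Multi-PR-GPA | dialogue_parser.py | parse_turns
-- ===== SOURCE A (Python) =====
-- def parse_turns(round_content):
--     """Parse the turns (User/Agent exchanges) in a round."""
--     turns = []
--     lines = round_content.split('\n')
--     current_speaker = None
--     current_text = []
--
--     for line in lines:
--         line = line.strip()
--         if line.startswith("User: "):
--             # Save previous turn if exists
--             if current_speaker and current_text:
--                 turns.append({
--                     "speaker": current_speaker,
--                     "text": '\n'.join(current_text).strip()
--                 })
--
--             # Start new User turn
--             current_speaker = "User"
--             current_text = [line[6:]]  # Remove "User: " prefix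
--         elif line.startswith("Agent: "):
--             # Save previous turn if exists
--             if current_speaker and current_text:
--                 turns.append({
--                     "speaker": current_speaker,
--                     "text": '\n'.join(current_text).strip()
--                 })
--
--             # Start new Agent turn
--             current_speaker = "Agent"
--             current_text = [line[7:]]  # Remove "Agent: " prefix
--         elif line:
--             # Continue with current turn
--             current_text.append(line)
--
--     # Add the last turn
--     if current_speaker and current_text:
--         turns.append({
--             "speaker": current_speaker,
--             "text": '\n'.join(current_text).strip()
--         })
--
--     return turns
-- ===== SOURCE B (Python) =====
-- def parse_turns(round_content):
--     """Parse the turns (User/Agent exchanges) in a round.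
--
--     Two-pointer segmentation: strip all lines up front, locate each speaker
--     header, scan forward to the next header, and build the turn from that
--     whole slice in one step (no incremental flush state machine).
--     """
--     stripped = [l.strip() for l in round_content.split('\n')]
--
--     def header(l):
--         if l.startswith("User: "):
--             return ("User", l[6:])
--         if l.startswith("Agent: "):
--             return ("Agent", l[7:])
--         return None
--
--     n = len(stripped)
--     turns = []
--     i = 0
--     while i < n and header(stripped[i]) is None:
--         i += 1  # discard everything before the first header
--     while i < n:
--         speaker, rest = header(stripped[i])
--         j = i + 1
--         while j < n and header(stripped[j]) is None:
--             j += 1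
--         body = [l for l in stripped[i + 1:j] if l]
--         turns.append({"speaker": speaker,
--                       "text": '\n'.join([rest] + body).strip()})
--         i = j
--     return turns
-- ===== Notes on version B (the rewrite author's own statement) =====
-- stated objective: alternative
-- what changed: B replaces A's incremental flush state machine (current_speaker/current_text with three duplicated flush blocks) by two-pointer segmentation: strip all lines first, locate each speaker header, scan forward to the next header, and build each turn from that whole slice in one step.
import Mathlib
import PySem

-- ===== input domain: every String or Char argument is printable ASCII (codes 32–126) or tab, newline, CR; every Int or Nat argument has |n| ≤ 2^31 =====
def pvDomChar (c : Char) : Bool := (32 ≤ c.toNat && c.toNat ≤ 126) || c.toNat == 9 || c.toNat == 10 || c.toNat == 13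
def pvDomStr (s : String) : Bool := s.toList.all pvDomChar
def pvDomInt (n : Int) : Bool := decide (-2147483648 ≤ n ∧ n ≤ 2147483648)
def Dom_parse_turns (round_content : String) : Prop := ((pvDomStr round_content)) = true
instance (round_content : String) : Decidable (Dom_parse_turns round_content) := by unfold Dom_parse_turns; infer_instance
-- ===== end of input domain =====

-- B replaces A's incremental flush state machine by two-pointer segmentation (strip all lines,
-- locate each header, take the slice up to the next header as one turn); objective: alternative.


-- ===== PORT A =====
-- A's state: (turns, current_speaker, current_text).  Python's truthiness test
-- `current_speaker and current_text` is `sp is some ∧ txt nonempty`.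
def pvFlushA (turns : List (List (String × String))) (sp : Option String)
    (txt : List String) : List (List (String × String)) :=
  match sp with
  | none => turns
  | some s =>
      if txt.isEmpty then turns
      else turns ++ [[("speaker", s), ("text", PySem.Str.strip (PySem.Str.join "\n" txt))]]

def pvStepA (st : List (List (String × String)) × Option String × List String)
    (line0 : String) : List (List (String × String)) × Option String × List String :=
  let line := PySem.Str.strip line0
  if PySem.Str.startswith line "User: " then
    (pvFlushA st.1 st.2.1 st.2.2, some "User", [PySem.Str.slice line (some 6) none])
  else if PySem.Str.startswith line "Agent: " then
    (pvFlushA st.1 st.2.1 st.2.2, some "Agent", [PySem.Str.slice line (some 7) none])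
  else if line ≠ "" then (st.1, st.2.1, st.2.2 ++ [line])
  else st

def parse_turns (round_content : String) : List (List (String × String)) :=
  let lines := (PySem.Str.split? round_content "\n").getD []
  let st := lines.foldl pvStepA ([], none, [])
  pvFlushA st.1 st.2.1 st.2.2

-- ===== PORT B =====
-- Source B's `header` helper.
def pvHeader (l : String) : Option (String × String) :=
  if PySem.Str.startswith l "User: " then some ("User", PySem.Str.slice l (some 6) none)
  else if PySem.Str.startswith l "Agent: " then some ("Agent", PySem.Str.slice l (some 7) none)
  else none

def pvNoHeader (l : String) : Bool := (pvHeader l).isNone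

-- Source B's two while loops over the stripped lines: the skip-to-first-header loop is the
-- `none` branch, each outer-loop iteration takes the slice up to the next header
-- (inner while j = takeWhile/dropWhile on the remainder).
def pvGo : List String → List (List (String × String))
  | [] => []
  | l :: ls =>
    match pvHeader l with
    | none => pvGo ls
    | some (sp, rest) =>
        let body := (ls.takeWhile pvNoHeader).filter (fun x => x ≠ "")
        [("speaker", sp), ("text", PySem.Str.strip (PySem.Str.join "\n" (rest :: body)))]
          :: pvGo (ls.dropWhile pvNoHeader)
termination_by ls => ls.length
decreasing_by
  · simp
  · exact Nat.lt_succ_of_le (List.length_dropWhile_le _ _)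

def parse_turns_alt (round_content : String) : List (List (String × String)) :=
  pvGo (((PySem.Str.split? round_content "\n").getD []).map PySem.Str.strip)

-- ===== PRECONDITION & SPEC =====
def Spec_parse_turns (round_content : String) (out : List (List (String × String))) : Prop := out = parse_turns_alt round_content
instance (round_content : String) (out : List (List (String × String))) : Decidable (Spec_parse_turns round_content out) := by unfold Spec_parse_turns; infer_instance

-- ===== CLAIM (what is proved, stated in full; the proofs are below) =====
def Claim_equal_parse_turns : Prop := ∀ (round_content : String), Dom_parse_turns round_content → Spec_parse_turns round_content (parse_turns round_content)

-- ===== LEMMAS AND PROOFS =====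

-- A's fold from an active-turn state: the pending turn absorbs the nonempty stripped lines
-- up to the next header, then segmentation continues.
lemma pvFold_some (ls : List String) : ∀ (ts : List (List (String × String)))
    (s : String) (txt : List String), txt ≠ [] →
    pvFlushA (ls.foldl pvStepA (ts, some s, txt)).1 (ls.foldl pvStepA (ts, some s, txt)).2.1
        (ls.foldl pvStepA (ts, some s, txt)).2.2 =
      ts ++ ([("speaker", s), ("text", PySem.Str.strip (PySem.Str.join "\n"
          (txt ++ ((ls.map PySem.Str.strip).takeWhile pvNoHeader).filter (fun x => x ≠ ""))))]
        :: pvGo ((ls.map PySem.Str.strip).dropWhile pvNoHeader)) := by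
  induction ls with
  | nil =>
      intro ts s txt htxt
      simp [pvFlushA, pvGo, List.isEmpty_iff, htxt]
  | cons l ls ih =>
      intro ts s txt htxt
      by_cases h1 : PySem.Str.startswith (PySem.Str.strip l) "User: " = true
      · have hh : pvHeader (PySem.Str.strip l) =
            some ("User", PySem.Str.slice (PySem.Str.strip l) (some 6) none) := by
          unfold pvHeader; rw [if_pos h1]
        simp only [List.foldl_cons, pvStepA]
        rw [if_pos h1, ih (pvFlushA ts (some s) txt) "User" _ (by simp)]
        simp [pvFlushA, List.isEmpty_iff, htxt, pvGo, hh, pvNoHeader]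
      · by_cases h2 : PySem.Str.startswith (PySem.Str.strip l) "Agent: " = true
        · have hh : pvHeader (PySem.Str.strip l) =
              some ("Agent", PySem.Str.slice (PySem.Str.strip l) (some 7) none) := by
            unfold pvHeader; rw [if_neg h1, if_pos h2]
          simp only [List.foldl_cons, pvStepA]
          rw [if_neg h1, if_pos h2, ih (pvFlushA ts (some s) txt) "Agent" _ (by simp)]
          simp [pvFlushA, List.isEmpty_iff, htxt, pvGo, hh, pvNoHeader]
        · have hh : pvHeader (PySem.Str.strip l) = none := by
            unfold pvHeader; rw [if_neg h1, if_neg h2]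
          have hnh : pvNoHeader (PySem.Str.strip l) = true := by simp [pvNoHeader, hh]
          by_cases h3 : PySem.Str.strip l = ""
          · simp only [List.foldl_cons, pvStepA]
            rw [if_neg h1, if_neg h2, if_neg (by simpa using h3),
              ih ts s txt htxt]
            have hnh0 : pvNoHeader "" = true := h3 ▸ hnh
            simp [h3, hnh0]
          · simp only [List.foldl_cons, pvStepA]
            rw [if_neg h1, if_neg h2, if_pos (by simpa using h3),
              ih ts s (txt ++ [PySem.Str.strip l]) (by simp)]
            simp [hnh, h3]

-- A's fold before any header: turns stay untouched and junk text is reset at the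
-- first header (or dropped at the end), so the result is segmentation of the tail.
lemma pvFold_none (ls : List String) : ∀ (ts : List (List (String × String)))
    (txt : List String),
    pvFlushA (ls.foldl pvStepA (ts, none, txt)).1 (ls.foldl pvStepA (ts, none, txt)).2.1
        (ls.foldl pvStepA (ts, none, txt)).2.2 =
      ts ++ pvGo (ls.map PySem.Str.strip) := by
  induction ls with
  | nil => intro ts txt; simp [pvFlushA, pvGo]
  | cons l ls ih =>
      intro ts txt
      by_cases h1 : PySem.Str.startswith (PySem.Str.strip l) "User: " = true
      · have hh : pvHeader (PySem.Str.strip l) =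
            some ("User", PySem.Str.slice (PySem.Str.strip l) (some 6) none) := by
          unfold pvHeader; rw [if_pos h1]
        simp only [List.foldl_cons, pvStepA]
        rw [if_pos h1, pvFold_some ls (pvFlushA ts none txt) "User" _ (by simp)]
        simp [pvFlushA, pvGo, hh]
      · by_cases h2 : PySem.Str.startswith (PySem.Str.strip l) "Agent: " = true
        · have hh : pvHeader (PySem.Str.strip l) =
              some ("Agent", PySem.Str.slice (PySem.Str.strip l) (some 7) none) := by
            unfold pvHeader; rw [if_neg h1, if_pos h2]
          simp only [List.foldl_cons, pvStepA]
          rw [if_neg h1, if_pos h2, pvFold_some ls (pvFlushA ts none txt) "Agent" _ (by simp)]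
          simp [pvFlushA, pvGo, hh]
        · have hh : pvHeader (PySem.Str.strip l) = none := by
            unfold pvHeader; rw [if_neg h1, if_neg h2]
          by_cases h3 : PySem.Str.strip l = ""
          · simp only [List.foldl_cons, pvStepA]
            rw [if_neg h1, if_neg h2, if_neg (by simpa using h3), ih ts txt]
            have hh0 : pvHeader "" = none := h3 ▸ hh
            simp [pvGo, h3, hh0]
          · simp only [List.foldl_cons, pvStepA]
            rw [if_neg h1, if_neg h2, if_pos (by simpa using h3),
              ih ts (txt ++ [PySem.Str.strip l])]
            simp [pvGo, hh]

-- ===== VERDICT (by name: the statement is the Claim_ definition above) =====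
theorem parse_turns_spec : Claim_equal_parse_turns := by
  intro rc _
  unfold Spec_parse_turns parse_turns parse_turns_alt
  simpa using pvFold_none ((PySem.Str.split? rc "\n").getD []) [] []
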